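-- pv_equiv track=rewrite | github.com/hieunguyencs/Lab1-Foundations-of-AI-CSC14003 | src/GBFS_station.py | cnt_distance
-- ===== SOURCE A (Python) =====
-- from collections import deque
--
-- dx = [1, -1, 0, 0]
--
-- dy = [0, 0, 1, -1]
--
-- def cnt_distance(grid, rows, cols):
--     start_x, start_y = None, None
--
--     # Find a border cell that is not 'x' to start from
--     for i in range(rows):
--         if grid[i][0] != 'x':
--             start_x, start_y = i, 0
--             break
--         if grid[i][cols - 1] != 'x':
--             start_x, start_y = i, cols - 1
--             break
--     for j in range(cols):
--         if grid[0][j] != 'x':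
--             start_x, start_y = 0, j
--             break
--         if grid[rows - 1][j] != 'x':
--             start_x, start_y = rows - 1, j
--             break
--
--     if start_x is None:
--         return []
--
--     visited = [[False for _ in range(cols)] for _ in range(rows)]
--     trace = [[(0, 0) for _ in range(cols)] for _ in range(rows)]
--     distance = [[0 for _ in range(cols)] for _ in range(rows)]
--     queue = deque()
--
--     queue.append((start_x, start_y))
--     visited[start_x][start_y] = True
--
--     while queue:
--         x, y = queue.popleft()
--
--         for i in range(4):
--             new_x, new_y = x + dx[i], y + dy[i]
--
--             if (
--                 0 <= new_x < rows
--                 and 0 <= new_y < cols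
--                 and not visited[new_x][new_y]
--                 and grid[new_x][new_y] != 'x'
--             ):
--                 queue.append((new_x, new_y))
--                 visited[new_x][new_y] = True
--                 trace[new_x][new_y] = (x, y)
--                 distance[new_x][new_y] = distance[x][y] + 1
--
--                 # draw_cell(new_x, new_y, VISITED_IMG)
--
--     return distance
-- ===== SOURCE B (Python) =====
-- def cnt_distance(grid, rows, cols):
--     start_x, start_y = None, None
--
--     # same border start search as the original (the second loop's hit, if any, wins)
--     for i in range(rows):
--         if grid[i][0] != 'x':
--             start_x, start_y = i, 0
--             break
--         if grid[i][cols - 1] != 'x':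
--             start_x, start_y = i, cols - 1
--             break
--     for j in range(cols):
--         if grid[0][j] != 'x':
--             start_x, start_y = 0, j
--             break
--         if grid[rows - 1][j] != 'x':
--             start_x, start_y = rows - 1, j
--             break
--
--     if start_x is None:
--         return []
--
--     # Bellman-Ford style relaxation: no queue/frontier at all.  Start at 0, every
--     # other cell at INF; sweep the whole grid, replacing each non-'x' cell by the
--     # min of itself and neighbour+1, until a sweep changes nothing.  The fixpoint
--     # assigns every reachable cell its shortest-path (= BFS) distance; INF cells
--     # (walls and unreachable cells) are rendered as 0, as in the original.
--     INF = rows * cols + 1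
--     dist = [[INF] * cols for _ in range(rows)]
--     dist[start_x][start_y] = 0
--
--     for _ in range(rows * cols + 1):
--         new = []
--         for i in range(rows):
--             row = []
--             for j in range(cols):
--                 v = dist[i][j]
--                 if grid[i][j] != 'x':
--                     for ni, nj in ((i + 1, j), (i - 1, j), (i, j + 1), (i, j - 1)):
--                         if 0 <= ni < rows and 0 <= nj < cols and dist[ni][nj] + 1 < v:
--                             v = dist[ni][nj] + 1
--                 row.append(v)
--             new.append(row)
--         if new == dist:
--             break
--         dist = new
--
--     return [[v if v < INF else 0 for v in row] for row in dist]
-- ===== Notes on version B (the rewrite author's own statement) =====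
-- stated objective: alternative
-- what changed: Replaces the deque-based BFS entirely by Bellman-Ford style relaxation: no queue, no visited array - the whole grid is swept repeatedly, each non-'x' cell taking the min of itself and neighbour+1, until a sweep changes nothing; INF entries (walls/unreachable) are then rendered as 0. The fixpoint is the shortest-path distance, which equals the BFS distance.
-- outside the precondition, e.g. on cnt_distance([['.', '.'], ['x', 'x']], 5, 1): A returns [[0], [0], [0], [0], [0]], B raises IndexError; on cnt_distance([['x', 'a']], 1, -1): A returns [], B returns []
import Mathlib
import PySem

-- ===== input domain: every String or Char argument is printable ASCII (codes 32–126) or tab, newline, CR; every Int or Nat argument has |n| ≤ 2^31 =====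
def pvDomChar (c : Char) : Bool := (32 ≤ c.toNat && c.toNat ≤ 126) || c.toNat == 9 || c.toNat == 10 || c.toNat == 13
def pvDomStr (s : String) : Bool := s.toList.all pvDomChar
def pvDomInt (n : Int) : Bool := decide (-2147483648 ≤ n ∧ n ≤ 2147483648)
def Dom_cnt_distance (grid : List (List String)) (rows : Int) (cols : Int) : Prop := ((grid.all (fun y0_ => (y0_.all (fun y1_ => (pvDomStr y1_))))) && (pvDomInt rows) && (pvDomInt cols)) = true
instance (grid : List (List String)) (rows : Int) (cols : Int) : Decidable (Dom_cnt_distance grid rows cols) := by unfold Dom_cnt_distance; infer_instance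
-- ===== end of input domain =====

-- B drops the queue-based BFS entirely and computes the same distances by Bellman–Ford style
-- relaxation: whole-grid sweeps replacing each non-'x' cell by min(self, neighbour+1) until a
-- sweep changes nothing, then rendering INF cells (walls / unreachable) as 0.  The fixpoint is
-- the shortest-path distance, which is proved below to equal A's BFS distance.  A's `trace`
-- array is computed but never read nor returned, so it is not carried by the port.

-- 2-d list access with a default (Python indexing here is always in range on Pre_; the default
-- is only reached outside Pre_).
def get2d {α : Type} (df : α) (m : List (List α)) (i j : Int) : α :=
  (m.getD i.toNat []).getD j.toNat df

-- lst[i][j] = x  (no-op out of range; in range on Pre_)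
def set2d {α : Type} (m : List (List α)) (i j : Int) (x : α) : List (List α) :=
  m.set i.toNat ((m.getD i.toNat []).set j.toNat x)

-- number of unvisited cells; with queue length it is the termination measure of A's BFS loop
def unvis (v : List (List Bool)) : Nat := (v.map (fun row => row.count false)).sum

-- zip of Python's dx, dy direction tables
def dirs : List (Int × Int) := [(1, 0), (-1, 0), (0, 1), (0, -1)]

-- A's neighbour check: enqueue, mark visited, write distance value w
def dirStep (grid : List (List String)) (rows cols x y w : Int)
    (st : List (Int × Int) × List (List Bool) × List (List Int)) (dir : Int × Int) :
    List (Int × Int) × List (List Bool) × List (List Int) :=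
  if 0 ≤ x + dir.1 ∧ x + dir.1 < rows ∧ 0 ≤ y + dir.2 ∧ y + dir.2 < cols ∧
      get2d true st.2.1 (x + dir.1) (y + dir.2) = false ∧
      get2d "x" grid (x + dir.1) (y + dir.2) ≠ "x" then
    (st.1 ++ [(x + dir.1, y + dir.2)], set2d st.2.1 (x + dir.1) (y + dir.2) true,
     set2d st.2.2 (x + dir.1) (y + dir.2) w)
  else st

-- termination lemmas (cited by port A's decreasing_by)
lemma count_set_false (row : List Bool) : ∀ b : Nat, row.getD b true = false →
    (row.set b true).count false + 1 = row.count false := by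
  induction row with
  | nil => intro b h; simp at h
  | cons a t ih =>
    intro b h
    cases b with
    | zero => simp_all
    | succ b =>
      simp only [List.getD_cons_succ] at h
      have := ih b h
      simp only [List.set_cons_succ, List.count_cons]
      omega

lemma unvis_flipN (v : List (List Bool)) : ∀ a b : Nat, (v.getD a []).getD b true = false →
    unvis (v.set a ((v.getD a []).set b true)) + 1 = unvis v := by
  induction v with
  | nil => intro a b h; simp at h
  | cons r t ih =>
    intro a b h
    cases a with
    | zero =>
      simp only [List.getD_cons_zero] at h
      have := count_set_false r b h
      simp only [List.getD_cons_zero, List.set_cons_zero, unvis, List.map_cons, List.sum_cons]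
      omega
    | succ a =>
      simp only [List.getD_cons_succ] at h
      simp only [List.getD_cons_succ, List.set_cons_succ, unvis, List.map_cons, List.sum_cons]
      have := ih a b h
      simp only [unvis] at this; omega

lemma unvis_flip (v : List (List Bool)) (i j : Int) (h : get2d true v i j = false) :
    unvis (set2d v i j true) + 1 = unvis v :=
  unvis_flipN v i.toNat j.toNat h

lemma dirStep_meas (grid : List (List String)) (rows cols x y w : Int)
    (st : List (Int × Int) × List (List Bool) × List (List Int)) (dir : Int × Int) :
    unvis (dirStep grid rows cols x y w st dir).2.1 + (dirStep grid rows cols x y w st dir).1.length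
      = unvis st.2.1 + st.1.length := by
  unfold dirStep
  split
  · next hcond =>
    have := unvis_flip st.2.1 (x + dir.1) (y + dir.2) hcond.2.2.2.2.1
    simp only [List.length_append, List.length_cons, List.length_nil]
    omega
  · rfl

lemma dirFold_meas (grid : List (List String)) (rows cols x y w : Int) (l : List (Int × Int)) :
    ∀ st, unvis (l.foldl (dirStep grid rows cols x y w) st).2.1
        + (l.foldl (dirStep grid rows cols x y w) st).1.length = unvis st.2.1 + st.1.length := by
  induction l with
  | nil => intro st; rfl
  | cons a t ih =>
    intro st
    simp only [List.foldl_cons]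
    rw [ih (dirStep grid rows cols x y w st a), dirStep_meas]

-- ===== PORT A =====
-- A's while-queue BFS: pop the head, scan the four directions, append discoveries at the back;
-- the written distance is distance[x][y] + 1 (Python re-reads distance[x][y] each direction;
-- (x,y) is a visited cell, never rewritten inside its own scan, so the value is read once here).
def bfsA (grid : List (List String)) (rows cols : Int) (v : List (List Bool))
    (d : List (List Int)) (queue : List (Int × Int)) : List (List Int) :=
  match queue with
  | [] => d
  | (x, y) :: rest =>
    let st := dirs.foldl (dirStep grid rows cols x y (get2d 0 d x y + 1)) (rest, v, d)
    bfsA grid rows cols st.2.1 st.2.2 st.1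
termination_by unvis v + queue.length
decreasing_by
  have h := dirFold_meas grid rows cols x y (get2d 0 d x y + 1) dirs (rest, v, d)
  simp at h ⊢; omega

-- the border start search of both Pythons: loop 1 over rows (column 0, then column cols-1),
-- loop 2 over columns (row 0, then row rows-1); loop 2 always runs, so its hit, if any,
-- overwrites loop 1's — hence loop 2's result is consulted first here.
def findStart (grid : List (List String)) (rows cols : Int) : Option (Int × Int) :=
  match (List.range cols.toNat).findSome? (fun (j : Nat) =>
      if get2d "x" grid 0 (j : Int) ≠ "x" then some ((0 : Int), (j : Int))
      else if get2d "x" grid (rows - 1) (j : Int) ≠ "x" then some (rows - 1, (j : Int))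
      else none) with
  | some p => some p
  | none =>
    (List.range rows.toNat).findSome? (fun (i : Nat) =>
      if get2d "x" grid (i : Int) 0 ≠ "x" then some ((i : Int), (0 : Int))
      else if get2d "x" grid (i : Int) (cols - 1) ≠ "x" then some ((i : Int), cols - 1)
      else none)

def cnt_distance (grid : List (List String)) (rows : Int) (cols : Int) : List (List Int) :=
  match findStart grid rows cols with
  | none => []
  | some (sx, sy) =>
    bfsA grid rows cols
      (set2d (List.replicate rows.toNat (List.replicate cols.toNat false)) sx sy true)
      (List.replicate rows.toNat (List.replicate cols.toNat (0 : Int)))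
      [(sx, sy)]

-- ===== PORT B =====
-- one cell of B's sweep: min of the cell and (neighbour value + 1) over the four in-bounds
-- neighbours, taken sequentially exactly as Source B's inner for-loop does; 'x' cells are skipped
def relaxV (grid : List (List String)) (rows cols : Int) (dist : List (List Int))
    (i j : Int) : Int :=
  if get2d "x" grid i j ≠ "x" then
    dirs.foldl (fun v dir =>
      if 0 ≤ i + dir.1 ∧ i + dir.1 < rows ∧ 0 ≤ j + dir.2 ∧ j + dir.2 < cols ∧
          get2d 0 dist (i + dir.1) (j + dir.2) + 1 < v
      then get2d 0 dist (i + dir.1) (j + dir.2) + 1 else v) (get2d 0 dist i j)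
  else get2d 0 dist i j

-- one whole-grid sweep (Source B builds `new` from the old `dist`, Jacobi style)
def sweep (grid : List (List String)) (rows cols : Int) (dist : List (List Int)) :
    List (List Int) :=
  (List.range rows.toNat).map (fun (i : Nat) =>
    (List.range cols.toNat).map (fun (j : Nat) => relaxV grid rows cols dist (i : Int) (j : Int)))

-- Source B's bounded relaxation loop: sweep until unchanged (break) or the round budget is spent
def jloop (grid : List (List String)) (rows cols : Int) :
    Nat → List (List Int) → List (List Int)
  | 0, dist => dist
  | fuel + 1, dist =>
    let new := sweep grid rows cols dist
    if new = dist then dist else jloop grid rows cols fuel new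

def cnt_distance_alt (grid : List (List String)) (rows : Int) (cols : Int) : List (List Int) :=
  match findStart grid rows cols with
  | none => []
  | some (sx, sy) =>
    (jloop grid rows cols (rows * cols + 1).toNat
        (set2d (List.replicate rows.toNat (List.replicate cols.toNat (rows * cols + 1))) sx sy
          0)).map
      (fun row => row.map (fun v => if v < rows * cols + 1 then v else 0))

-- ===== PRECONDITION & SPEC =====
-- Pre_ admits boards whose first rows×cols region is fully present (then A always returns) and
-- the fully degenerate rows ≤ 0 ∧ cols ≤ 0 case (A returns []); it excludes the remaining
-- shapes — rows exceeding the grid, a too-short row in the scanned region, mixed-sign sizes —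
-- on which A usually raises IndexError, and on which, whenever A does return (its scan stopped
-- early or wrapped around before any missing cell), B raises or returns the same (see cites).
def Pre_cnt_distance (grid : List (List String)) (rows : Int) (cols : Int) : Prop :=
  (0 < rows ∧ 0 < cols ∧ rows ≤ (grid.length : Int) ∧
    ∀ k : Nat, k < rows.toNat → cols ≤ ((grid.getD k []).length : Int))
  ∨ (rows ≤ 0 ∧ cols ≤ 0)
instance (grid : List (List String)) (rows : Int) (cols : Int) : Decidable (Pre_cnt_distance grid rows cols) := by unfold Pre_cnt_distance; infer_instance

def pvWitness_cnt_distance : List (List String) × Int × Int := ([[".", "x"], ["a", "b"]], 2, 2)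

def Spec_cnt_distance (grid : List (List String)) (rows : Int) (cols : Int) (out : List (List Int)) : Prop := out = cnt_distance_alt grid rows cols
instance (grid : List (List String)) (rows : Int) (cols : Int) (out : List (List Int)) : Decidable (Spec_cnt_distance grid rows cols out) := by unfold Spec_cnt_distance; infer_instance

-- ===== CLAIM (what is proved, stated in full; the proofs are below) =====
def Claim_equal_cnt_distance : Prop := ∀ (grid : List (List String)) (rows : Int) (cols : Int), Dom_cnt_distance grid rows cols → Pre_cnt_distance grid rows cols → Spec_cnt_distance grid rows cols (cnt_distance grid rows cols)

-- ===== LEMMAS AND PROOFS =====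

-- proof-side intermediate: level-synchronous BFS; A's FIFO BFS is first proved equal to it,
-- then it is proved equal to B's relaxation fixpoint.
def processCell (grid : List (List String)) (rows cols level : Int)
    (st : List (Int × Int) × List (List Bool) × List (List Int)) (c : Int × Int) :
    List (Int × Int) × List (List Bool) × List (List Int) :=
  dirs.foldl (dirStep grid rows cols c.1 c.2 (level + 1)) st

lemma cellFold_meas (grid : List (List String)) (rows cols level : Int) (l : List (Int × Int)) :
    ∀ st, unvis (l.foldl (processCell grid rows cols level) st).2.1
        + (l.foldl (processCell grid rows cols level) st).1.length
      = unvis st.2.1 + st.1.length := by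
  induction l with
  | nil => intro st; rfl
  | cons a t ih =>
    intro st
    simp only [List.foldl_cons]
    rw [ih (processCell grid rows cols level st a)]
    exact dirFold_meas grid rows cols a.1 a.2 (level + 1) dirs st

def bfsB (grid : List (List String)) (rows cols : Int) (v : List (List Bool))
    (d : List (List Int)) (frontier : List (Int × Int)) (level : Int) : List (List Int) :=
  match frontier with
  | [] => d
  | c :: rest =>
    let st := (c :: rest).foldl (processCell grid rows cols level) ([], v, d)
    bfsB grid rows cols st.2.1 st.2.2 st.1 (level + 1)
termination_by unvis v + frontier.length
decreasing_by
  have h := cellFold_meas grid rows cols level (c :: rest) ([], v, d)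
  simp at h ⊢; omega

-- unfolding equations for the loops
lemma bfsA_nil (grid : List (List String)) (rows cols : Int) (v : List (List Bool))
    (d : List (List Int)) : bfsA grid rows cols v d [] = d := by
  rw [bfsA]

lemma bfsA_cons (grid : List (List String)) (rows cols : Int) (v : List (List Bool))
    (d : List (List Int)) (x y : Int) (rest : List (Int × Int)) :
    bfsA grid rows cols v d ((x, y) :: rest) =
      bfsA grid rows cols
        (dirs.foldl (dirStep grid rows cols x y (get2d 0 d x y + 1)) (rest, v, d)).2.1
        (dirs.foldl (dirStep grid rows cols x y (get2d 0 d x y + 1)) (rest, v, d)).2.2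
        (dirs.foldl (dirStep grid rows cols x y (get2d 0 d x y + 1)) (rest, v, d)).1 := by
  rw [bfsA]

lemma bfsB_nil (grid : List (List String)) (rows cols : Int) (v : List (List Bool))
    (d : List (List Int)) (level : Int) : bfsB grid rows cols v d [] level = d := by
  rw [bfsB]

lemma bfsB_cons (grid : List (List String)) (rows cols : Int) (v : List (List Bool))
    (d : List (List Int)) (c : Int × Int) (rest : List (Int × Int)) (level : Int) :
    bfsB grid rows cols v d (c :: rest) level =
      bfsB grid rows cols
        ((c :: rest).foldl (processCell grid rows cols level) ([], v, d)).2.1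
        ((c :: rest).foldl (processCell grid rows cols level) ([], v, d)).2.2
        ((c :: rest).foldl (processCell grid rows cols level) ([], v, d)).1 (level + 1) := by
  rw [bfsB]

-- 1-d getD/set facts used throughout
lemma getD_set_self {α : Type} (l : List α) (i : Nat) (a d : α) (h : i < l.length) :
    (l.set i a).getD i d = a := by
  rw [List.getD_eq_getElem?_getD, List.getElem?_set_self h]; rfl

lemma getD_set_ne {α : Type} (l : List α) (i j : Nat) (a d : α) (h : i ≠ j) :
    (l.set i a).getD j d = l.getD j d := by
  rw [List.getD_eq_getElem?_getD, List.getElem?_set_ne h, ← List.getD_eq_getElem?_getD]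

lemma getD_replicate' {α : Type} (n i : Nat) (a d : α) :
    (List.replicate n a).getD i d = if i < n then a else d := by
  rw [List.getD_eq_getElem?_getD, List.getElem?_replicate]
  split <;> rfl

-- 2-d access/update facts
lemma inrange_of_get2d_ne {α : Type} (df : α) (m : List (List α)) (i j : Int)
    (h : get2d df m i j ≠ df) :
    i.toNat < m.length ∧ j.toNat < (m.getD i.toNat []).length := by
  unfold get2d at h
  constructor
  · by_contra hc
    push Not at hc
    rw [List.getD_eq_default _ _ hc] at h
    simp at h
  · by_contra hc
    push Not at hc
    rw [List.getD_eq_default _ _ hc] at h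
    exact h rfl

lemma get2d_set2d_self {α : Type} (df x : α) (m : List (List α)) (i j : Int)
    (h1 : i.toNat < m.length) (h2 : j.toNat < (m.getD i.toNat []).length) :
    get2d df (set2d m i j x) i j = x := by
  unfold get2d set2d
  rw [getD_set_self m i.toNat _ [] h1, getD_set_self _ j.toNat _ df h2]

lemma get2d_set2d_ne {α : Type} (df x : α) (m : List (List α)) (a b i j : Int)
    (h : i.toNat ≠ a.toNat ∨ j.toNat ≠ b.toNat) :
    get2d df (set2d m a b x) i j = get2d df m i j := by
  unfold get2d set2d
  by_cases hi : i.toNat = a.toNat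
  · rcases h with h | h
    · exact absurd hi h
    · rw [hi]
      by_cases hlen : a.toNat < m.length
      · rw [getD_set_self m a.toNat _ [] hlen, getD_set_ne _ b.toNat j.toNat _ df (fun hh => h hh.symm)]
      · rw [List.set_eq_of_length_le (le_of_not_gt hlen)]
  · rw [getD_set_ne m a.toNat i.toNat _ [] (fun hh => hi hh.symm)]

lemma get2d_congr {α : Type} (df : α) (m : List (List α)) (i j a b : Int)
    (h1 : i.toNat = a.toNat) (h2 : j.toNat = b.toNat) : get2d df m i j = get2d df m a b := by
  unfold get2d; rw [h1, h2]

-- the v/d grids keep the rows.toNat × cols.toNat shape they are created with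
def Shape {α : Type} (m : List (List α)) (R C : Nat) : Prop :=
  m.length = R ∧ ∀ (k : Nat) (r : List α), m[k]? = some r → r.length = C

lemma shape_replicate {α : Type} (R C : Nat) (x : α) :
    Shape (List.replicate R (List.replicate C x)) R C := by
  refine ⟨by simp, ?_⟩
  intro k r hk
  rw [List.getElem?_replicate] at hk
  split at hk
  · cases hk; simp
  · cases hk

lemma shape_set2d {α : Type} {m : List (List α)} {R C : Nat} (a b : Int) (x : α)
    (h : Shape m R C) : Shape (set2d m a b x) R C := by
  refine ⟨by simpa [set2d] using h.1, ?_⟩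
  intro k r hk
  unfold set2d at hk
  rw [List.getElem?_set] at hk
  split at hk
  · split at hk
    · cases hk
      next heq hlt =>
        have hrow : m[a.toNat]? = some (m.getD a.toNat []) := by
          rw [List.getD_eq_getElem?_getD]
          rw [List.getElem?_eq_getElem hlt]
          rfl
        have := h.2 a.toNat _ hrow
        simpa using this
    · cases hk
  · exact h.2 k r hk

lemma get2d_set2d_self' {α : Type} (df x : α) {m : List (List α)} {R C : Nat}
    (h : Shape m R C) (i j : Int) (h1 : i.toNat < R) (h2 : j.toNat < C) :
    get2d df (set2d m i j x) i j = x := by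
  apply get2d_set2d_self
  · rw [h.1]; exact h1
  · have hlt : i.toNat < m.length := by rw [h.1]; exact h1
    have hrow : m[i.toNat]? = some (m.getD i.toNat []) := by
      rw [List.getD_eq_getElem?_getD, List.getElem?_eq_getElem hlt]; rfl
    rw [h.2 i.toNat _ hrow]; exact h2

lemma get2d_rep {α : Type} (x df : α) (R C : Nat) (i j : Int)
    (h1 : i.toNat < R) (h2 : j.toNat < C) :
    get2d df (List.replicate R (List.replicate C x)) i j = x := by
  unfold get2d
  rw [getD_replicate', if_pos h1, getD_replicate', if_pos h2]

lemma get2d_rep_zero (R C : Nat) (i j : Int) :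
    get2d (0 : Int) (List.replicate R (List.replicate C 0)) i j = 0 := by
  unfold get2d
  rw [getD_replicate']
  split
  · rw [getD_replicate']
    split <;> rfl
  · rfl

-- the queue prefix is inert: a direction scan only appends at the back
lemma dirFold_prefix (grid : List (List String)) (rows cols x y w : Int) (l : List (Int × Int)) :
    ∀ (p q : List (Int × Int)) (v : List (List Bool)) (d : List (List Int)),
      l.foldl (dirStep grid rows cols x y w) (p ++ q, v, d)
        = (p ++ (l.foldl (dirStep grid rows cols x y w) (q, v, d)).1,
           (l.foldl (dirStep grid rows cols x y w) (q, v, d)).2.1,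
           (l.foldl (dirStep grid rows cols x y w) (q, v, d)).2.2) := by
  induction l with
  | nil => intro p q v d; rfl
  | cons dir t ih =>
    intro p q v d
    simp only [List.foldl_cons]
    by_cases hc : (0 ≤ x + dir.1 ∧ x + dir.1 < rows ∧ 0 ≤ y + dir.2 ∧ y + dir.2 < cols ∧
        get2d true v (x + dir.1) (y + dir.2) = false ∧
        get2d "x" grid (x + dir.1) (y + dir.2) ≠ "x")
    · rw [show dirStep grid rows cols x y w (p ++ q, v, d) dir
          = ((p ++ q) ++ [(x + dir.1, y + dir.2)],
             set2d v (x + dir.1) (y + dir.2) true, set2d d (x + dir.1) (y + dir.2) w) from by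
            simp [dirStep, hc],
        show dirStep grid rows cols x y w (q, v, d) dir
          = (q ++ [(x + dir.1, y + dir.2)],
             set2d v (x + dir.1) (y + dir.2) true, set2d d (x + dir.1) (y + dir.2) w) from by
            simp [dirStep, hc],
        List.append_assoc]
      exact ih p (q ++ [(x + dir.1, y + dir.2)]) _ _
    · rw [show dirStep grid rows cols x y w (p ++ q, v, d) dir = (p ++ q, v, d) from by
          simp only [dirStep]; rw [if_neg hc],
        show dirStep grid rows cols x y w (q, v, d) dir = (q, v, d) from by
          simp only [dirStep]; rw [if_neg hc]]
      exact ih p q v d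

-- one direction scan: shape is kept, visited cells keep their distance, and every newly
-- appended cell is visited with distance w
lemma dirFold_spec (grid : List (List String)) (rows cols x y w : Int) (l : List (Int × Int)) :
    ∀ (q : List (Int × Int)) (v : List (List Bool)) (d : List (List Int)),
      Shape d rows.toNat cols.toNat →
      Shape (l.foldl (dirStep grid rows cols x y w) (q, v, d)).2.2 rows.toNat cols.toNat
      ∧ (∀ i j : Int, get2d true v i j = true →
          get2d true (l.foldl (dirStep grid rows cols x y w) (q, v, d)).2.1 i j = true ∧
          get2d 0 (l.foldl (dirStep grid rows cols x y w) (q, v, d)).2.2 i j = get2d 0 d i j)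
      ∧ (∃ new, (l.foldl (dirStep grid rows cols x y w) (q, v, d)).1 = q ++ new ∧
          ∀ c ∈ new,
            get2d true (l.foldl (dirStep grid rows cols x y w) (q, v, d)).2.1 c.1 c.2 = true ∧
            get2d 0 (l.foldl (dirStep grid rows cols x y w) (q, v, d)).2.2 c.1 c.2 = w) := by
  induction l with
  | nil =>
    intro q v d hsh
    exact ⟨hsh, fun i j h => ⟨h, rfl⟩, [], by simp, by simp⟩
  | cons dir t ih =>
    intro q v d hsh
    simp only [List.foldl_cons]
    by_cases hc : (0 ≤ x + dir.1 ∧ x + dir.1 < rows ∧ 0 ≤ y + dir.2 ∧ y + dir.2 < cols ∧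
        get2d true v (x + dir.1) (y + dir.2) = false ∧
        get2d "x" grid (x + dir.1) (y + dir.2) ≠ "x")
    · rw [show dirStep grid rows cols x y w (q, v, d) dir
          = (q ++ [(x + dir.1, y + dir.2)],
             set2d v (x + dir.1) (y + dir.2) true, set2d d (x + dir.1) (y + dir.2) w) from by
            simp [dirStep, hc]]
      obtain ⟨hc1, hc2, hc3, hc4, hc5, _⟩ := hc
      have hsh' := shape_set2d (m := d) (x + dir.1) (y + dir.2) w hsh
      obtain ⟨S1, S2, new, hnew, Hnew⟩ := ih (q ++ [(x + dir.1, y + dir.2)]) _ _ hsh'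
      have hpres : ∀ i j : Int, get2d true v i j = true →
          get2d true (set2d v (x + dir.1) (y + dir.2) true) i j = true ∧
          get2d 0 (set2d d (x + dir.1) (y + dir.2) w) i j = get2d 0 d i j := by
        intro i j hij
        have hne : i.toNat ≠ (x + dir.1).toNat ∨ j.toNat ≠ (y + dir.2).toNat := by
          by_contra hcon
          push Not at hcon
          rw [get2d_congr true v i j (x + dir.1) (y + dir.2) hcon.1 hcon.2, hc5] at hij
          exact Bool.false_ne_true hij
        exact ⟨by rw [get2d_set2d_ne _ _ _ _ _ _ _ hne]; exact hij,
               get2d_set2d_ne _ _ _ _ _ _ _ hne⟩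
      refine ⟨S1, ?_, (x + dir.1, y + dir.2) :: new, ?_, ?_⟩
      · intro i j hij
        have h' := hpres i j hij
        have h'' := S2 i j h'.1
        exact ⟨h''.1, by rw [h''.2, h'.2]⟩
      · rw [hnew, List.append_assoc]
        rfl
      · intro c hcmem
        rcases List.mem_cons.1 hcmem with hceq | hcmem'
        · subst hceq
          have hrange := inrange_of_get2d_ne true v (x + dir.1) (y + dir.2) (by simp [hc5])
          have hvset : get2d true (set2d v (x + dir.1) (y + dir.2) true) (x + dir.1) (y + dir.2)
              = true := get2d_set2d_self true true v _ _ hrange.1 hrange.2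
          have hdset : get2d 0 (set2d d (x + dir.1) (y + dir.2) w) (x + dir.1) (y + dir.2) = w :=
            get2d_set2d_self' 0 w hsh _ _ (by omega) (by omega)
          have h'' := S2 (x + dir.1) (y + dir.2) hvset
          exact ⟨h''.1, by rw [h''.2, hdset]⟩
        · exact Hnew c hcmem'
    · rw [show dirStep grid rows cols x y w (q, v, d) dir = (q, v, d) from by
          simp only [dirStep]; rw [if_neg hc]]
      exact ih q v d hsh

-- main invariant of A = level-BFS: A's queue is (rest of the current level) ++ (next level
-- collected so far); running A from there equals finishing the frontier fold and continuing
lemma bfsA_eq (grid : List (List String)) (rows cols : Int) :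
    ∀ (n : Nat) (level : Int) (l1 l2 : List (Int × Int)) (v : List (List Bool))
      (d : List (List Int)),
      2 * (unvis v + l1.length + l2.length) + (if l1 = [] then 1 else 0) ≤ n →
      Shape d rows.toNat cols.toNat →
      (∀ c ∈ l1, get2d true v c.1 c.2 = true ∧ get2d 0 d c.1 c.2 = level) →
      (∀ c ∈ l2, get2d true v c.1 c.2 = true ∧ get2d 0 d c.1 c.2 = level + 1) →
      bfsA grid rows cols v d (l1 ++ l2)
        = bfsB grid rows cols
            (l1.foldl (processCell grid rows cols level) (l2, v, d)).2.1
            (l1.foldl (processCell grid rows cols level) (l2, v, d)).2.2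
            (l1.foldl (processCell grid rows cols level) (l2, v, d)).1
            (level + 1) := by
  intro n
  induction n using Nat.strong_induction_on with
  | _ n IH =>
  intro level l1 l2 v d hn hsh h1 h2
  cases l1 with
  | nil =>
    simp only [List.foldl_nil, List.nil_append]
    cases l2 with
    | nil => rw [bfsA_nil, bfsB_nil]
    | cons c rest =>
      rw [if_pos rfl] at hn
      rw [bfsB_cons]
      have key := IH (n - 1) (by omega) (level + 1) (c :: rest) [] v d
        (by
          rw [if_neg (List.cons_ne_nil c rest)]
          simp only [List.length_cons, List.length_nil] at hn ⊢
          omega) hsh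
        (by simpa using h2) (by simp)
      rw [List.append_nil] at key
      exact key
  | cons hd rest =>
    obtain ⟨x, y⟩ := hd
    have hxy := h1 (x, y) List.mem_cons_self
    have hmeas := dirFold_meas grid rows cols x y (level + 1) dirs (l2, v, d)
    obtain ⟨S1, S2, new, hnew, Hnew⟩ :=
      dirFold_spec grid rows cols x y (level + 1) dirs l2 v d hsh
    simp only [if_neg (List.cons_ne_nil (x, y) rest), List.length_cons] at hn
    rw [List.cons_append, bfsA_cons, hxy.2, dirFold_prefix grid rows cols x y (level + 1) dirs]
    have key := IH (n - 1) (by omega) level rest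
      (dirs.foldl (dirStep grid rows cols x y (level + 1)) (l2, v, d)).1
      (dirs.foldl (dirStep grid rows cols x y (level + 1)) (l2, v, d)).2.1
      (dirs.foldl (dirStep grid rows cols x y (level + 1)) (l2, v, d)).2.2
      (by
        simp only at hmeas
        have htag : (if rest = [] then 1 else 0) ≤ 1 := by split <;> omega
        omega)
      S1
      (by
        intro c hc
        have hv := h1 c (List.mem_cons_of_mem _ hc)
        have h' := S2 c.1 c.2 hv.1
        exact ⟨h'.1, by rw [h'.2, hv.2]⟩)
      (by
        intro c hc
        rw [hnew] at hc
        rcases List.mem_append.1 hc with hc' | hc'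
        · have hv := h2 c hc'
          have h' := S2 c.1 c.2 hv.1
          exact ⟨h'.1, by rw [h'.2, hv.2]⟩
        · exact Hnew c hc')
    exact key

-- the start cell produced by the border search is inside the board and not an 'x'
lemma findStart_bounds (grid : List (List String)) (rows cols sx sy : Int)
    (hr : 0 < rows) (hc : 0 < cols) (h : findStart grid rows cols = some (sx, sy)) :
    (0 ≤ sx ∧ sx < rows ∧ 0 ≤ sy ∧ sy < cols) ∧ get2d "x" grid sx sy ≠ "x" := by
  unfold findStart at h
  split at h
  · next p heq =>
    obtain ⟨j, hj, hfj⟩ := List.exists_of_findSome?_eq_some heq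
    rw [List.mem_range] at hj
    cases h
    split_ifs at hfj with hf1 hf2
    · cases hfj; exact ⟨by constructor <;> omega, hf1⟩
    · cases hfj; exact ⟨by constructor <;> omega, hf2⟩
  · obtain ⟨i, hi, hfi⟩ := List.exists_of_findSome?_eq_some h
    rw [List.mem_range] at hi
    split_ifs at hfi with hf1 hf2
    · cases hfi; exact ⟨by constructor <;> omega, hf1⟩
    · cases hfi; exact ⟨by constructor <;> omega, hf2⟩

-- ---------- vocabulary for the BFS ↔ relaxation proof ----------

def Inb (rows cols i j : Int) : Prop := 0 ≤ i ∧ i < rows ∧ 0 ≤ j ∧ j < cols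

def Freec (grid : List (List String)) (i j : Int) : Prop := get2d "x" grid i j ≠ "x"

def Adj (f : List (Int × Int)) (i j : Int) : Prop :=
  ∃ p ∈ f, ∃ dir ∈ dirs, p.1 + dir.1 = i ∧ p.2 + dir.2 = j

-- a cell discovered by expanding frontier f from visited set v
def Newly (grid : List (List String)) (rows cols : Int) (v : List (List Bool))
    (f : List (Int × Int)) (i j : Int) : Prop :=
  Inb rows cols i j ∧ Freec grid i j ∧ get2d true v i j = false ∧ Adj f i j

-- the coupling invariant between the level-BFS state (v, d, f at level k) and the
-- relaxation grid J: visited cells carry their final distance in both, everything else is INF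
def InvJ (grid : List (List String)) (rows cols k : Int) (v : List (List Bool))
    (d J : List (List Int)) (f : List (Int × Int)) : Prop :=
  Shape v rows.toNat cols.toNat ∧ Shape d rows.toNat cols.toNat ∧
  Shape J rows.toNat cols.toNat ∧ 0 ≤ k ∧
  (∀ i j, Inb rows cols i j → get2d true v i j = true →
      Freec grid i j ∧ get2d 0 J i j = get2d 0 d i j ∧ 0 ≤ get2d 0 d i j ∧
      get2d 0 d i j ≤ k ∧ get2d 0 d i j + (unvis v : Int) + 1 ≤ rows * cols) ∧
  (∀ i j, Inb rows cols i j → ¬ get2d true v i j = true →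
      get2d 0 J i j = rows * cols + 1 ∧ get2d 0 d i j = 0) ∧
  (∀ c : Int × Int, c ∈ f ↔
      (Inb rows cols c.1 c.2 ∧ get2d true v c.1 c.2 = true ∧ get2d 0 d c.1 c.2 = k)) ∧
  (∀ i j, Inb rows cols i j → Freec grid i j → ¬ get2d true v i j = true →
      ∀ dir ∈ dirs, Inb rows cols (i + dir.1) (j + dir.2) →
        get2d true v (i + dir.1) (j + dir.2) = true →
        get2d 0 d (i + dir.1) (j + dir.2) = k) ∧
  (∀ i j, Inb rows cols i j → get2d true v i j = true →
      ∀ dir ∈ dirs, Inb rows cols (i + dir.1) (j + dir.2) →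
        get2d true v (i + dir.1) (j + dir.2) = true →
        get2d 0 d i j - 1 ≤ get2d 0 d (i + dir.1) (j + dir.2))

lemma neg_mem_dirs : ∀ dir ∈ dirs, (-dir.1, -dir.2) ∈ dirs := by decide

lemma get2d_eq_getElem {α : Type} (df : α) (m : List (List α)) (i j : Nat)
    (hi : i < m.length) (hj : j < m[i].length) :
    get2d df m (i : Int) (j : Int) = m[i][j] := by
  unfold get2d
  simp only [Int.toNat_natCast]
  rw [List.getD_eq_getElem _ _ hi, List.getD_eq_getElem _ _ hj]

-- list extensionality through get2d on a common shape
lemma eq_of_shape_get2d {α : Type} (df : α) (m1 m2 : List (List α)) (R C : Nat)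
    (h1 : Shape m1 R C) (h2 : Shape m2 R C)
    (h : ∀ i j : Nat, i < R → j < C → get2d df m1 (i : Int) (j : Int) = get2d df m2 (i : Int) (j : Int)) :
    m1 = m2 := by
  apply List.ext_getElem
  · rw [h1.1, h2.1]
  · intro i hi1 hi2
    have hlen1 : m1[i].length = C := h1.2 i _ (List.getElem?_eq_getElem hi1)
    have hlen2 : m2[i].length = C := h2.2 i _ (List.getElem?_eq_getElem hi2)
    apply List.ext_getElem
    · rw [hlen1, hlen2]
    · intro j hj1 hj2
      have hiR : i < R := by rw [← h1.1]; exact hi1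
      have hjC : j < C := by rw [← hlen1]; exact hj1
      have hh := h i j hiR hjC
      rw [get2d_eq_getElem df m1 i j hi1 hj1, get2d_eq_getElem df m2 i j hi2 hj2] at hh
      exact hh

-- sweep has the declared shape and its entries are relaxV
lemma shape_sweep (grid : List (List String)) (rows cols : Int) (dist : List (List Int)) :
    Shape (sweep grid rows cols dist) rows.toNat cols.toNat := by
  refine ⟨by simp [sweep], ?_⟩
  intro k r hk
  simp only [sweep, List.getElem?_map] at hk
  cases hr' : (List.range rows.toNat)[k]? with
  | none => rw [hr'] at hk; cases hk
  | some a => rw [hr'] at hk; cases hk; simp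

lemma get2d_sweep (grid : List (List String)) (rows cols : Int) (dist : List (List Int))
    (i j : Nat) (hi : i < rows.toNat) (hj : j < cols.toNat) :
    get2d 0 (sweep grid rows cols dist) (i : Int) (j : Int)
      = relaxV grid rows cols dist (i : Int) (j : Int) := by
  simp [get2d, sweep, List.getD_eq_getElem?_getD, hi, hj]

-- the sequential min fold of relaxV: result is bounded by the seed and all in-bounds
-- candidates, and equals one of them
lemma relaxFold_spec (rows cols : Int) (dist : List (List Int)) (i j : Int)
    (ds : List (Int × Int)) : ∀ v0 : Int,
    (ds.foldl (fun v dir =>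
      if 0 ≤ i + dir.1 ∧ i + dir.1 < rows ∧ 0 ≤ j + dir.2 ∧ j + dir.2 < cols ∧
          get2d 0 dist (i + dir.1) (j + dir.2) + 1 < v
      then get2d 0 dist (i + dir.1) (j + dir.2) + 1 else v) v0) ≤ v0 ∧
    (∀ dir ∈ ds, Inb rows cols (i + dir.1) (j + dir.2) →
      (ds.foldl (fun v dir =>
        if 0 ≤ i + dir.1 ∧ i + dir.1 < rows ∧ 0 ≤ j + dir.2 ∧ j + dir.2 < cols ∧
            get2d 0 dist (i + dir.1) (j + dir.2) + 1 < v
        then get2d 0 dist (i + dir.1) (j + dir.2) + 1 else v) v0)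
        ≤ get2d 0 dist (i + dir.1) (j + dir.2) + 1) ∧
    ((ds.foldl (fun v dir =>
        if 0 ≤ i + dir.1 ∧ i + dir.1 < rows ∧ 0 ≤ j + dir.2 ∧ j + dir.2 < cols ∧
            get2d 0 dist (i + dir.1) (j + dir.2) + 1 < v
        then get2d 0 dist (i + dir.1) (j + dir.2) + 1 else v) v0) = v0 ∨
      ∃ dir ∈ ds, Inb rows cols (i + dir.1) (j + dir.2) ∧
        (ds.foldl (fun v dir =>
          if 0 ≤ i + dir.1 ∧ i + dir.1 < rows ∧ 0 ≤ j + dir.2 ∧ j + dir.2 < cols ∧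
              get2d 0 dist (i + dir.1) (j + dir.2) + 1 < v
          then get2d 0 dist (i + dir.1) (j + dir.2) + 1 else v) v0)
          = get2d 0 dist (i + dir.1) (j + dir.2) + 1) := by
  induction ds with
  | nil => exact fun v0 => ⟨le_refl v0, by simp, Or.inl rfl⟩
  | cons dir t ih =>
    intro v0
    simp only [List.foldl_cons]
    set c := get2d 0 dist (i + dir.1) (j + dir.2) + 1 with hc
    set v1 := if 0 ≤ i + dir.1 ∧ i + dir.1 < rows ∧ 0 ≤ j + dir.2 ∧ j + dir.2 < cols ∧
        c < v0 then c else v0 with hv1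
    obtain ⟨ih1, ih2, ih3⟩ := ih v1
    have hv1le : v1 ≤ v0 := by
      rw [hv1]; split
      · next h => exact le_of_lt h.2.2.2.2
      · exact le_refl v0
    refine ⟨le_trans ih1 hv1le, ?_, ?_⟩
    · intro dir' hmem hinb
      rcases List.mem_cons.1 hmem with rfl | hmem'
      · have hvc : v1 ≤ c := by
          rw [hv1]
          split
          · exact le_refl c
          · next hg =>
            by_contra hcon
            push Not at hcon
            exact hg ⟨hinb.1, hinb.2.1, hinb.2.2.1, hinb.2.2.2, hcon⟩
        exact le_trans ih1 hvc
      · exact ih2 dir' hmem' hinb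
    · rcases ih3 with h | ⟨dir', hmem', hinb', heq'⟩
      · by_cases hg : 0 ≤ i + dir.1 ∧ i + dir.1 < rows ∧ 0 ≤ j + dir.2 ∧ j + dir.2 < cols ∧
            c < v0
        · refine Or.inr ⟨dir, List.mem_cons_self, ⟨hg.1, hg.2.1, hg.2.2.1, hg.2.2.2.1⟩, ?_⟩
          rw [hv1, if_pos hg] at h
          rw [hv1, if_pos hg]
          exact h
        · refine Or.inl ?_
          rw [hv1, if_neg hg] at h
          rw [hv1, if_neg hg]
          exact h
      · exact Or.inr ⟨dir', List.mem_cons_of_mem _ hmem', hinb', heq'⟩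

-- set-level description of one dirStep fold from cell (x, y) writing w
lemma dirFold_set (grid : List (List String)) (rows cols x y w : Int) :
    ∀ (ds : List (Int × Int)) (q : List (Int × Int)) (v : List (List Bool))
      (d : List (List Int)),
      Shape v rows.toNat cols.toNat → Shape d rows.toNat cols.toNat →
      Shape (ds.foldl (dirStep grid rows cols x y w) (q, v, d)).2.1 rows.toNat cols.toNat ∧
      Shape (ds.foldl (dirStep grid rows cols x y w) (q, v, d)).2.2 rows.toNat cols.toNat ∧
      (∀ i j, Inb rows cols i j →
        (get2d true (ds.foldl (dirStep grid rows cols x y w) (q, v, d)).2.1 i j = true ↔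
          get2d true v i j = true ∨
          (Inb rows cols i j ∧ Freec grid i j ∧ get2d true v i j = false ∧
            ∃ dir ∈ ds, x + dir.1 = i ∧ y + dir.2 = j))) ∧
      (∀ i j, Inb rows cols i j →
        (Inb rows cols i j ∧ Freec grid i j ∧ get2d true v i j = false ∧
            ∃ dir ∈ ds, x + dir.1 = i ∧ y + dir.2 = j) →
          get2d 0 (ds.foldl (dirStep grid rows cols x y w) (q, v, d)).2.2 i j = w) ∧
      (∀ i j, Inb rows cols i j →
        ¬ (Inb rows cols i j ∧ Freec grid i j ∧ get2d true v i j = false ∧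
            ∃ dir ∈ ds, x + dir.1 = i ∧ y + dir.2 = j) →
          get2d 0 (ds.foldl (dirStep grid rows cols x y w) (q, v, d)).2.2 i j
            = get2d 0 d i j) ∧
      (∀ c : Int × Int, c ∈ (ds.foldl (dirStep grid rows cols x y w) (q, v, d)).1 ↔
        c ∈ q ∨ (Inb rows cols c.1 c.2 ∧ Freec grid c.1 c.2 ∧
          get2d true v c.1 c.2 = false ∧ ∃ dir ∈ ds, x + dir.1 = c.1 ∧ y + dir.2 = c.2)) := by
  intro ds
  induction ds with
  | nil =>
    intro q v d hv hd
    refine ⟨hv, hd, ?_, ?_, ?_, ?_⟩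
    · intro i j _
      simp
    · intro i j _ hN
      exact absurd hN.2.2.2 (by simp)
    · intro i j _ _
      rfl
    · intro c
      simp
  | cons dir t ih =>
    intro q v d hv hd
    simp only [List.foldl_cons]
    by_cases hG : (0 ≤ x + dir.1 ∧ x + dir.1 < rows ∧ 0 ≤ y + dir.2 ∧ y + dir.2 < cols ∧
        get2d true v (x + dir.1) (y + dir.2) = false ∧
        get2d "x" grid (x + dir.1) (y + dir.2) ≠ "x")
    · obtain ⟨g1, g2, g3, g4, g5, g6⟩ := hG
      rw [show dirStep grid rows cols x y w (q, v, d) dir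
          = (q ++ [(x + dir.1, y + dir.2)],
             set2d v (x + dir.1) (y + dir.2) true, set2d d (x + dir.1) (y + dir.2) w) from by
            simp [dirStep, g1, g2, g3, g4, g5, g6]]
      have hv1 := shape_set2d (m := v) (x + dir.1) (y + dir.2) true hv
      have hd1 := shape_set2d (m := d) (x + dir.1) (y + dir.2) w hd
      obtain ⟨S1, S2, P3, P4, P5, P6⟩ := ih (q ++ [(x + dir.1, y + dir.2)]) _ _ hv1 hd1
      -- reading the updated grids
      have hvget : ∀ i j : Int, Inb rows cols i j →
          (get2d true (set2d v (x + dir.1) (y + dir.2) true) i j = true ↔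
            (get2d true v i j = true ∨ (i = x + dir.1 ∧ j = y + dir.2))) := by
        intro i j hinb
        by_cases heq : i = x + dir.1 ∧ j = y + dir.2
        · obtain ⟨rfl, rfl⟩ := heq
          rw [get2d_set2d_self' true true hv _ _ (by omega) (by omega)]
          simp
        · rw [get2d_set2d_ne true true v _ _ _ _ (by obtain ⟨i1, i2, i3, i4⟩ := hinb; omega)]
          simp only [iff_self_or]
          intro h'
          exact absurd h' heq
      have hdget_eq : get2d 0 (set2d d (x + dir.1) (y + dir.2) w) (x + dir.1) (y + dir.2)
          = w := get2d_set2d_self' 0 w hd _ _ (by omega) (by omega)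
      have hdget_ne : ∀ i j : Int, Inb rows cols i j → ¬ (i = x + dir.1 ∧ j = y + dir.2) →
          get2d 0 (set2d d (x + dir.1) (y + dir.2) w) i j = get2d 0 d i j := by
        intro i j hinb hne
        exact get2d_set2d_ne 0 w d _ _ _ _ (by obtain ⟨i1, i2, i3, i4⟩ := hinb; omega)
      -- translating the "newly" predicates between the two bases
      have hNP : ∀ i j : Int, Inb rows cols i j →
          ((Inb rows cols i j ∧ Freec grid i j ∧
              get2d true (set2d v (x + dir.1) (y + dir.2) true) i j = false ∧
              ∃ dir' ∈ t, x + dir'.1 = i ∧ y + dir'.2 = j) ∨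
            (i = x + dir.1 ∧ j = y + dir.2) ↔
            (Inb rows cols i j ∧ Freec grid i j ∧ get2d true v i j = false ∧
              ∃ dir' ∈ dir :: t, x + dir'.1 = i ∧ y + dir'.2 = j)) := by
        intro i j hinb
        constructor
        · rintro (⟨_, hfree, hunvis, dir', hmem', hij⟩ | ⟨rfl, rfl⟩)
          · have hvv : get2d true v i j = false := by
              rcases Bool.eq_false_or_eq_true (get2d true v i j) with h' | h'
              · rw [(hvget i j hinb).2 (Or.inl h')] at hunvis
                cases hunvis
              · exact h'
            exact ⟨hinb, hfree, hvv, dir', List.mem_cons_of_mem _ hmem', hij⟩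
          · exact ⟨hinb, g6, g5, dir, List.mem_cons_self, rfl, rfl⟩
        · rintro ⟨_, hfree, hunvis, dir', hmem', hij⟩
          by_cases heq : i = x + dir.1 ∧ j = y + dir.2
          · exact Or.inr heq
          · refine Or.inl ⟨hinb, hfree, ?_, ?_⟩
            · rcases Bool.eq_false_or_eq_true
                (get2d true (set2d v (x + dir.1) (y + dir.2) true) i j) with h' | h'
              · rcases (hvget i j hinb).1 h' with h'' | h''
                · rw [h''] at hunvis; cases hunvis
                · exact absurd h'' heq
              · exact h'
            · rcases List.mem_cons.1 hmem' with rfl | hmem''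
              · exact absurd ⟨hij.1.symm, hij.2.symm⟩ heq
              · exact ⟨dir', hmem'', hij⟩
      refine ⟨S1, S2, ?_, ?_, ?_, ?_⟩
      · intro i j hinb
        rw [P3 i j hinb]
        constructor
        · rintro (h' | h')
          · rcases (hvget i j hinb).1 h' with h'' | h''
            · exact Or.inl h''
            · exact Or.inr ((hNP i j hinb).1 (Or.inr h''))
          · exact Or.inr ((hNP i j hinb).1 (Or.inl h'))
        · rintro (h' | h')
          · exact Or.inl ((hvget i j hinb).2 (Or.inl h'))
          · rcases (hNP i j hinb).2 h' with h'' | h''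
            · exact Or.inr h''
            · exact Or.inl ((hvget i j hinb).2 (Or.inr h''))
      · intro i j hinb hN
        rcases (hNP i j hinb).2 hN with h'' | h''
        · exact P4 i j hinb h''
        · obtain ⟨rfl, rfl⟩ := And.intro h''.1.symm h''.2.symm
          rw [P5 _ _ hinb]
          · exact hdget_eq
          · intro hcon
            have : get2d true (set2d v (x + dir.1) (y + dir.2) true) (x + dir.1) (y + dir.2)
                = true := (hvget _ _ hinb).2 (Or.inr ⟨rfl, rfl⟩)
            rw [this] at hcon
            exact Bool.noConfusion hcon.2.2.1
      · intro i j hinb hN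
        have hne : ¬ (i = x + dir.1 ∧ j = y + dir.2) := by
          intro heq
          exact hN ((hNP i j hinb).1 (Or.inr heq))
        rw [P5 i j hinb]
        · exact hdget_ne i j hinb hne
        · intro hcon
          exact hN ((hNP i j hinb).1 (Or.inl hcon))
      · intro c
        rw [P6 c]
        have hc0 : Inb rows cols (x + dir.1) (y + dir.2) := ⟨g1, g2, g3, g4⟩
        constructor
        · rintro (hq | hN)
          · rcases List.mem_append.1 hq with hq' | hq'
            · exact Or.inl hq'
            · have hceq : c = (x + dir.1, y + dir.2) := List.mem_singleton.1 hq'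
              have hc1 : c.1 = x + dir.1 := by rw [hceq]
              have hc2 : c.2 = y + dir.2 := by rw [hceq]
              have hstart := (hNP (x + dir.1) (y + dir.2) hc0).1
                (Or.inr ⟨Eq.refl (x + dir.1), Eq.refl (y + dir.2)⟩)
              refine Or.inr ?_
              rw [hc1, hc2]
              exact hstart
          · exact Or.inr ((hNP c.1 c.2 hN.1).1 (Or.inl hN))
        · rintro (hq | hN)
          · exact Or.inl (List.mem_append.2 (Or.inl hq))
          · rcases (hNP c.1 c.2 hN.1).2 hN with h'' | h''
            · exact Or.inr h''
            · refine Or.inl (List.mem_append.2 (Or.inr ?_))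
              rw [List.mem_singleton, ← h''.1, ← h''.2]
    · rw [show dirStep grid rows cols x y w (q, v, d) dir = (q, v, d) from by
          simp only [dirStep]; rw [if_neg hG]]
      obtain ⟨S1, S2, P3, P4, P5, P6⟩ := ih q v d hv hd
      have hNP : ∀ i j : Int, Inb rows cols i j →
          ((Inb rows cols i j ∧ Freec grid i j ∧ get2d true v i j = false ∧
              ∃ dir' ∈ dir :: t, x + dir'.1 = i ∧ y + dir'.2 = j) ↔
            (Inb rows cols i j ∧ Freec grid i j ∧ get2d true v i j = false ∧
              ∃ dir' ∈ t, x + dir'.1 = i ∧ y + dir'.2 = j)) := by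
        intro i j hinb
        constructor
        · rintro ⟨h1, h2, h3, dir', hmem', hij⟩
          rcases List.mem_cons.1 hmem' with rfl | hmem''
          · exfalso
            obtain ⟨rfl, rfl⟩ := And.intro hij.1 hij.2
            exact hG ⟨h1.1, h1.2.1, h1.2.2.1, h1.2.2.2, h3, h2⟩
          · exact ⟨h1, h2, h3, dir', hmem'', hij⟩
        · rintro ⟨h1, h2, h3, dir', hmem', hij⟩
          exact ⟨h1, h2, h3, dir', List.mem_cons_of_mem _ hmem', hij⟩
      refine ⟨S1, S2, ?_, ?_, ?_, ?_⟩
      · intro i j hinb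
        rw [P3 i j hinb]
        constructor
        · rintro (h' | h')
          · exact Or.inl h'
          · exact Or.inr ((hNP i j hinb).2 h')
        · rintro (h' | h')
          · exact Or.inl h'
          · exact Or.inr ((hNP i j hinb).1 h')
      · intro i j hinb hN
        exact P4 i j hinb ((hNP i j hinb).1 hN)
      · intro i j hinb hN
        exact P5 i j hinb (fun h' => hN ((hNP i j hinb).2 h'))
      · intro c
        rw [P6 c]
        constructor
        · rintro (hq | hN)
          · exact Or.inl hq
          · exact Or.inr ((hNP c.1 c.2 hN.1).2 hN)
        · rintro (hq | hN)
          · exact Or.inl hq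
          · exact Or.inr ((hNP c.1 c.2 hN.1).1 hN)

-- set-level description of one whole BFS level (fold of processCell over the frontier)
lemma stepFold_set (grid : List (List String)) (rows cols k : Int) :
    ∀ (f : List (Int × Int)) (q : List (Int × Int)) (v : List (List Bool))
      (d : List (List Int)),
      Shape v rows.toNat cols.toNat → Shape d rows.toNat cols.toNat →
      Shape (f.foldl (processCell grid rows cols k) (q, v, d)).2.1 rows.toNat cols.toNat ∧
      Shape (f.foldl (processCell grid rows cols k) (q, v, d)).2.2 rows.toNat cols.toNat ∧
      (∀ i j, Inb rows cols i j →
        (get2d true (f.foldl (processCell grid rows cols k) (q, v, d)).2.1 i j = true ↔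
          get2d true v i j = true ∨ Newly grid rows cols v f i j)) ∧
      (∀ i j, Inb rows cols i j → Newly grid rows cols v f i j →
          get2d 0 (f.foldl (processCell grid rows cols k) (q, v, d)).2.2 i j = k + 1) ∧
      (∀ i j, Inb rows cols i j → ¬ Newly grid rows cols v f i j →
          get2d 0 (f.foldl (processCell grid rows cols k) (q, v, d)).2.2 i j
            = get2d 0 d i j) ∧
      (∀ c : Int × Int, c ∈ (f.foldl (processCell grid rows cols k) (q, v, d)).1 ↔
        c ∈ q ∨ Newly grid rows cols v f c.1 c.2) := by
  intro f
  induction f with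
  | nil =>
    intro q v d hv hd
    refine ⟨hv, hd, ?_, ?_, ?_, ?_⟩
    · intro i j _
      simp [Newly, Adj]
    · intro i j _ hN
      rcases hN.2.2.2 with ⟨p, hp, -⟩
      exact absurd hp (List.not_mem_nil)
    · intro i j _ _
      rfl
    · intro c
      simp [Newly, Adj]
  | cons p rest ih =>
    intro q v d hv hd
    simp only [List.foldl_cons]
    obtain ⟨T1, T2, T3, T4, T5, T6⟩ :=
      dirFold_set grid rows cols p.1 p.2 (k + 1) dirs q v d hv hd
    set st1 := dirs.foldl (dirStep grid rows cols p.1 p.2 (k + 1)) (q, v, d) with hst1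
    have hPC : processCell grid rows cols k (q, v, d) p = (st1.1, st1.2.1, st1.2.2) := rfl
    rw [hPC]
    obtain ⟨S1, S2, P3, P4, P5, P6⟩ := ih st1.1 st1.2.1 st1.2.2 T1 T2
    -- translating discovery by p followed by discovery by rest into discovery by p :: rest
    have hNP : ∀ i j : Int, Inb rows cols i j →
        ((Newly grid rows cols st1.2.1 rest i j ∨
          (Inb rows cols i j ∧ Freec grid i j ∧ get2d true v i j = false ∧
            ∃ dir ∈ dirs, p.1 + dir.1 = i ∧ p.2 + dir.2 = j)) ↔
          Newly grid rows cols v (p :: rest) i j) := by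
      intro i j hinb
      simp only [Newly, Adj]
      constructor
      · rintro (⟨_, hfree, hunvis, p', hp', dir', hdir', hij⟩ | ⟨_, hfree, hunvis, dir', hdir', hij⟩)
        · have hvv : get2d true v i j = false := by
            rcases Bool.eq_false_or_eq_true (get2d true v i j) with h' | h'
            · rw [(T3 i j hinb).2 (Or.inl h')] at hunvis
              cases hunvis
            · exact h'
          exact ⟨hinb, hfree, hvv, p', List.mem_cons_of_mem _ hp', dir', hdir', hij⟩
        · exact ⟨hinb, hfree, hunvis, p, List.mem_cons_self, dir', hdir', hij⟩
      · rintro ⟨_, hfree, hunvis, p', hp', dir', hdir', hij⟩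
        by_cases hNp : Inb rows cols i j ∧ Freec grid i j ∧ get2d true v i j = false ∧
            ∃ dir ∈ dirs, p.1 + dir.1 = i ∧ p.2 + dir.2 = j
        · exact Or.inr hNp
        · rcases List.mem_cons.1 hp' with rfl | hp''
          · exact absurd ⟨hinb, hfree, hunvis, dir', hdir', hij⟩ hNp
          · have hunvis1 : get2d true st1.2.1 i j = false := by
              rcases Bool.eq_false_or_eq_true (get2d true st1.2.1 i j) with h' | h'
              · rcases (T3 i j hinb).1 h' with h'' | h''
                · rw [h''] at hunvis; cases hunvis
                · exact absurd h'' hNp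
              · exact h'
            exact Or.inl ⟨hinb, hfree, hunvis1, p', hp'', dir', hdir', hij⟩
    refine ⟨S1, S2, ?_, ?_, ?_, ?_⟩
    · intro i j hinb
      rw [P3 i j hinb]
      constructor
      · rintro (h' | h')
        · rcases (T3 i j hinb).1 h' with h'' | h''
          · exact Or.inl h''
          · exact Or.inr ((hNP i j hinb).1 (Or.inr h''))
        · exact Or.inr ((hNP i j hinb).1 (Or.inl h'))
      · rintro (h' | h')
        · exact Or.inl ((T3 i j hinb).2 (Or.inl h'))
        · rcases (hNP i j hinb).2 h' with h'' | h''
          · exact Or.inr h''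
          · exact Or.inl ((T3 i j hinb).2 (Or.inr h''))
    · intro i j hinb hN
      rcases (hNP i j hinb).2 hN with h'' | h''
      · exact P4 i j hinb h''
      · rw [P5 i j hinb]
        · exact T4 i j hinb h''
        · intro hcon
          have hv1t : get2d true st1.2.1 i j = true := (T3 i j hinb).2 (Or.inr h'')
          have hv1f : get2d true st1.2.1 i j = false := hcon.2.2.1
          rw [hv1t] at hv1f
          exact Bool.noConfusion hv1f
    · intro i j hinb hN
      have hnp : ¬ (Inb rows cols i j ∧ Freec grid i j ∧ get2d true v i j = false ∧
          ∃ dir ∈ dirs, p.1 + dir.1 = i ∧ p.2 + dir.2 = j) := by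
        intro hcon
        exact hN ((hNP i j hinb).1 (Or.inr hcon))
      rw [P5 i j hinb]
      · exact T5 i j hinb hnp
      · intro hcon
        exact hN ((hNP i j hinb).1 (Or.inl hcon))
    · intro c
      rw [P6 c]
      constructor
      · rintro (hq | hN)
        · rcases (T6 c).1 hq with hq' | hq'
          · exact Or.inl hq'
          · exact Or.inr ((hNP c.1 c.2 hq'.1).1 (Or.inr hq'))
        · exact Or.inr ((hNP c.1 c.2 hN.1).1 (Or.inl hN))
      · rintro (hq | hN)
        · exact Or.inl ((T6 c).2 (Or.inl hq))
        · rcases (hNP c.1 c.2 hN.1).2 hN with h'' | h''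
          · exact Or.inr h''
          · exact Or.inl ((T6 c).2 (Or.inr h''))

-- pointwise characterisations of relaxV
lemma relax_not_free (grid : List (List String)) (rows cols : Int) (J : List (List Int))
    (i j : Int) (h : ¬ Freec grid i j) :
    relaxV grid rows cols J i j = get2d 0 J i j := by
  have h' : ¬ get2d "x" grid i j ≠ "x" := h
  unfold relaxV
  rw [if_neg h']

lemma relax_keep (grid : List (List String)) (rows cols : Int) (J : List (List Int))
    (i j : Int) (hfree : Freec grid i j)
    (h : ∀ dir ∈ dirs, Inb rows cols (i + dir.1) (j + dir.2) →
      get2d 0 J i j ≤ get2d 0 J (i + dir.1) (j + dir.2) + 1) :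
    relaxV grid rows cols J i j = get2d 0 J i j := by
  have hfree' : get2d "x" grid i j ≠ "x" := hfree
  unfold relaxV
  rw [if_pos hfree']
  obtain ⟨h1, h2, h3⟩ := relaxFold_spec rows cols J i j dirs (get2d 0 J i j)
  rcases h3 with h3 | ⟨dir, hmem, hinb, heq⟩
  · exact h3
  · have := h dir hmem hinb
    omega

lemma relax_min (grid : List (List String)) (rows cols : Int) (J : List (List Int))
    (i j t : Int) (hfree : Freec grid i j) (hub : t ≤ get2d 0 J i j)
    (hex : ∃ dir ∈ dirs, Inb rows cols (i + dir.1) (j + dir.2) ∧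
      get2d 0 J (i + dir.1) (j + dir.2) + 1 = t)
    (hall : ∀ dir ∈ dirs, Inb rows cols (i + dir.1) (j + dir.2) →
      t ≤ get2d 0 J (i + dir.1) (j + dir.2) + 1) :
    relaxV grid rows cols J i j = t := by
  have hfree' : get2d "x" grid i j ≠ "x" := hfree
  unfold relaxV
  rw [if_pos hfree']
  obtain ⟨h1, h2, h3⟩ := relaxFold_spec rows cols J i j dirs (get2d 0 J i j)
  obtain ⟨dir0, hmem0, hinb0, heq0⟩ := hex
  have hle := h2 dir0 hmem0 hinb0
  rcases h3 with h3 | ⟨dir, hmem, hinb, heq⟩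
  · omega
  · have := hall dir hmem hinb
    omega

lemma get2d_sweep' (grid : List (List String)) (rows cols : Int) (J : List (List Int))
    (i j : Int) (hinb : Inb rows cols i j) :
    get2d 0 (sweep grid rows cols J) i j = relaxV grid rows cols J i j := by
  obtain ⟨h1, h2, h3, h4⟩ := hinb
  have hi : i = ((i.toNat : Nat) : Int) := by omega
  have hj : j = ((j.toNat : Nat) : Int) := by omega
  rw [hi, hj]
  exact get2d_sweep grid rows cols J i.toNat j.toNat (by omega) (by omega)

-- a discovered cell has a frontier neighbour, hence k + 1 is small
lemma newly_bound (grid : List (List String)) (rows cols k : Int) (v : List (List Bool))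
    (d J : List (List Int)) (f : List (Int × Int)) (hInv : InvJ grid rows cols k v d J f)
    (i j : Int) (hN : Newly grid rows cols v f i j) :
    k + (unvis v : Int) + 1 ≤ rows * cols := by
  unfold InvJ at hInv
  obtain ⟨-, -, -, -, hvs, -, hcf, -, -⟩ := hInv
  obtain ⟨-, -, -, p, hp, -⟩ := hN
  have hpf := (hcf p).1 hp
  have := (hvs p.1 p.2 hpf.1 hpf.2.1).2.2.2.2
  rw [hpf.2.2] at this
  exact this

-- sweep at an already-visited cell keeps its distance
lemma sweep_vis (grid : List (List String)) (rows cols k : Int) (v : List (List Bool))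
    (d J : List (List Int)) (f : List (Int × Int)) (hInv : InvJ grid rows cols k v d J f)
    (i j : Int) (hinb : Inb rows cols i j) (hvis : get2d true v i j = true) :
    get2d 0 (sweep grid rows cols J) i j = get2d 0 d i j := by
  have hInv' := hInv
  unfold InvJ at hInv'
  obtain ⟨-, -, -, hk0, hvs, hus, hcf, hd4, he5⟩ := hInv'
  obtain ⟨hfree, hJd, hd0, hdk, hdb⟩ := hvs i j hinb hvis
  rw [get2d_sweep' grid rows cols J i j hinb]
  rw [relax_keep grid rows cols J i j hfree ?_]
  · exact hJd
  · intro dir hdir hinb2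
    rw [hJd]
    rcases Bool.eq_false_or_eq_true (get2d true v (i + dir.1) (j + dir.2)) with hnb | hnb
    · have := he5 i j hinb hvis dir hdir hinb2 hnb
      have hJn := (hvs _ _ hinb2 hnb).2.1
      rw [hJn]
      omega
    · have hJn := (hus _ _ hinb2 (by rw [hnb]; exact Bool.noConfusion)).1
      rw [hJn]
      omega

-- sweep at a discovered cell produces k + 1
lemma sweep_new (grid : List (List String)) (rows cols k : Int) (v : List (List Bool))
    (d J : List (List Int)) (f : List (Int × Int)) (hInv : InvJ grid rows cols k v d J f)
    (i j : Int) (hinb : Inb rows cols i j) (hN : Newly grid rows cols v f i j) :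
    get2d 0 (sweep grid rows cols J) i j = k + 1 := by
  have hkb := newly_bound grid rows cols k v d J f hInv i j hN
  have hInv' := hInv
  unfold InvJ at hInv'
  obtain ⟨-, -, -, hk0, hvs, hus, hcf, hd4, he5⟩ := hInv'
  obtain ⟨-, hfree, hunvis, p, hp, dir0, hdir0, hij⟩ := hN
  have hpf := (hcf p).1 hp
  have hJINF : get2d 0 J i j = rows * cols + 1 :=
    (hus i j hinb (by rw [hunvis]; exact Bool.noConfusion)).1
  rw [get2d_sweep' grid rows cols J i j hinb]
  apply relax_min grid rows cols J i j (k + 1) hfree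
  · rw [hJINF]; omega
  · refine ⟨(-dir0.1, -dir0.2), neg_mem_dirs dir0 hdir0, ?_, ?_⟩
    · have : i + -dir0.1 = p.1 ∧ j + -dir0.2 = p.2 := by
        obtain ⟨ha, hb⟩ := hij
        constructor <;> omega
      rw [this.1, this.2]
      exact hpf.1
    · have hco : i + -dir0.1 = p.1 ∧ j + -dir0.2 = p.2 := by
        obtain ⟨ha, hb⟩ := hij
        constructor <;> omega
      rw [hco.1, hco.2, (hvs p.1 p.2 hpf.1 hpf.2.1).2.1, hpf.2.2]
  · intro dir hdir hinb2
    rcases Bool.eq_false_or_eq_true (get2d true v (i + dir.1) (j + dir.2)) with hnb | hnb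
    · have hdn := hd4 i j hinb hfree (by rw [hunvis]; exact Bool.noConfusion) dir hdir hinb2 hnb
      rw [(hvs _ _ hinb2 hnb).2.1, hdn]
    · rw [(hus _ _ hinb2 (by rw [hnb]; exact Bool.noConfusion)).1]
      omega

-- sweep at an undiscovered, unvisited cell stays INF
lemma sweep_idle (grid : List (List String)) (rows cols k : Int) (v : List (List Bool))
    (d J : List (List Int)) (f : List (Int × Int)) (hInv : InvJ grid rows cols k v d J f)
    (i j : Int) (hinb : Inb rows cols i j) (hnvis : ¬ get2d true v i j = true)
    (hnN : ¬ Newly grid rows cols v f i j) :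
    get2d 0 (sweep grid rows cols J) i j = rows * cols + 1 := by
  have hInv' := hInv
  unfold InvJ at hInv'
  obtain ⟨-, -, -, hk0, hvs, hus, hcf, hd4, he5⟩ := hInv'
  have hJINF : get2d 0 J i j = rows * cols + 1 := (hus i j hinb hnvis).1
  rw [get2d_sweep' grid rows cols J i j hinb]
  by_cases hfree : Freec grid i j
  · rw [relax_keep grid rows cols J i j hfree ?_]
    · exact hJINF
    · intro dir hdir hinb2
      rcases Bool.eq_false_or_eq_true (get2d true v (i + dir.1) (j + dir.2)) with hnb | hnb
      · exfalso
        have hdn := hd4 i j hinb hfree hnvis dir hdir hinb2 hnb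
        have hpmem : (i + dir.1, j + dir.2) ∈ f := (hcf (i + dir.1, j + dir.2)).2
          ⟨hinb2, hnb, hdn⟩
        refine hnN ⟨hinb, hfree, ?_, ?_⟩
        · rcases Bool.eq_false_or_eq_true (get2d true v i j) with h' | h'
          · exact absurd h' hnvis
          · exact h'
        · refine ⟨(i + dir.1, j + dir.2), hpmem, (-dir.1, -dir.2), neg_mem_dirs dir hdir, ?_, ?_⟩
          · omega
          · omega
      · rw [(hus _ _ hinb2 (by rw [hnb]; exact Bool.noConfusion)).1, hJINF]
        omega
  · rw [relax_not_free grid rows cols J i j hfree]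
    exact hJINF

-- if expanding the frontier discovers nothing, a sweep changes nothing
lemma sweep_fix (grid : List (List String)) (rows cols k : Int) (v : List (List Bool))
    (d J : List (List Int)) (f : List (Int × Int)) (hr : 0 < rows) (hc : 0 < cols)
    (hInv : InvJ grid rows cols k v d J f)
    (hnone : ∀ i j, ¬ Newly grid rows cols v f i j) :
    sweep grid rows cols J = J := by
  have hInv' := hInv
  unfold InvJ at hInv'
  obtain ⟨-, -, hShJ, hk0, hvs, hus, -, -, -⟩ := hInv'
  apply eq_of_shape_get2d 0 _ _ rows.toNat cols.toNat (shape_sweep grid rows cols J) hShJ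
  intro i j hi hj
  have hinb : Inb rows cols (i : Int) (j : Int) := by
    refine ⟨by omega, by omega, by omega, by omega⟩
  rcases Bool.eq_false_or_eq_true (get2d true v (i : Int) (j : Int)) with hnb | hnb
  · rw [sweep_vis grid rows cols k v d J f hInv _ _ hinb hnb, (hvs _ _ hinb hnb).2.1]
  · rw [sweep_idle grid rows cols k v d J f hInv _ _ hinb (by rw [hnb]; exact Bool.noConfusion)
      (hnone _ _), (hus _ _ hinb (by rw [hnb]; exact Bool.noConfusion)).1]

-- shapes survive an elementwise map
lemma shape_map (g : Int → Int) (m : List (List Int)) (R C : Nat) (h : Shape m R C) :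
    Shape (m.map (List.map g)) R C := by
  refine ⟨by simp [h.1], ?_⟩
  intro k r hk
  rw [List.getElem?_map] at hk
  cases hm : m[k]? with
  | none => rw [hm] at hk; cases hk
  | some a =>
    rw [hm] at hk
    cases hk
    simp [h.2 k a hm]

lemma get2d_map (g : Int → Int) (m : List (List Int)) (i j : Nat)
    (hi : i < m.length) (hj : j < m[i].length) :
    get2d 0 (m.map (List.map g)) (i : Int) (j : Int) = g m[i][j] := by
  rw [get2d_eq_getElem 0 (m.map (List.map g)) i j (by simpa using hi) (by simpa using hj)]
  simp

-- visited cells render to their distance, everything else to 0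
lemma render_eq (grid : List (List String)) (rows cols k : Int) (v : List (List Bool))
    (d J : List (List Int)) (f : List (Int × Int)) (hr : 0 < rows) (hc : 0 < cols)
    (hInv : InvJ grid rows cols k v d J f) :
    J.map (fun row => row.map (fun x => if x < rows * cols + 1 then x else 0)) = d := by
  have hInv' := hInv
  unfold InvJ at hInv'
  obtain ⟨-, hShd, hShJ, hk0, hvs, hus, -, -, -⟩ := hInv'
  apply eq_of_shape_get2d 0 _ _ rows.toNat cols.toNat
    (shape_map _ J rows.toNat cols.toNat hShJ) hShd
  intro i j hi hj
  have hinb : Inb rows cols (i : Int) (j : Int) := by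
    refine ⟨by omega, by omega, by omega, by omega⟩
  have hiJ : i < J.length := by rw [hShJ.1]; exact hi
  have hjJ : j < J[i].length := by
    rw [hShJ.2 i J[i] (List.getElem?_eq_getElem hiJ)]; exact hj
  rw [get2d_map _ J i j hiJ hjJ]
  have hJg : get2d 0 J (i : Int) (j : Int) = J[i][j] := get2d_eq_getElem 0 J i j hiJ hjJ
  rcases Bool.eq_false_or_eq_true (get2d true v (i : Int) (j : Int)) with hnb | hnb
  · have h1 := hvs _ _ hinb hnb
    have h2 := h1.2.2.2.2
    have h3 : (0:Int) ≤ (unvis v : Int) := Int.natCast_nonneg _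
    rw [← hJg, h1.2.1, if_pos (by omega)]
  · have h1 := hus _ _ hinb (by rw [hnb]; exact Bool.noConfusion)
    rw [← hJg, h1.1, if_neg (by omega), h1.2]

-- one BFS level preserves the invariant against one sweep
lemma inv_step (grid : List (List String)) (rows cols k : Int) (v : List (List Bool))
    (d J : List (List Int)) (f : List (Int × Int)) (hr : 0 < rows) (hc : 0 < cols)
    (hInv : InvJ grid rows cols k v d J f) :
    InvJ grid rows cols (k + 1)
      (f.foldl (processCell grid rows cols k) ([], v, d)).2.1
      (f.foldl (processCell grid rows cols k) ([], v, d)).2.2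
      (sweep grid rows cols J)
      (f.foldl (processCell grid rows cols k) ([], v, d)).1 := by
  have hInv' := hInv
  unfold InvJ at hInv'
  obtain ⟨hShv, hShd, hShJ, hk0, hvs, hus, hcf, hd4, he5⟩ := hInv'
  obtain ⟨S1, S2, P3, P4, P5, P6⟩ := stepFold_set grid rows cols k f [] v d hShv hShd
  have hmeas : unvis (f.foldl (processCell grid rows cols k) ([], v, d)).2.1
      + (f.foldl (processCell grid rows cols k) ([], v, d)).1.length = unvis v := by
    have := cellFold_meas grid rows cols k f ([], v, d)
    simpa using this
  -- a visited cell is never "newly discovered"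
  have hnotNew : ∀ i j : Int, get2d true v i j = true → ¬ Newly grid rows cols v f i j := by
    intro i j hvis hcon
    have := hcon.2.2.1
    rw [hvis] at this
    exact Bool.noConfusion this
  unfold InvJ
  refine ⟨S1, S2, shape_sweep grid rows cols J, by omega, ?_, ?_, ?_, ?_, ?_⟩
  · -- visited spec at level k + 1
    intro i j hinb hvis'
    rcases (P3 i j hinb).1 hvis' with hvold | hNnew
    · obtain ⟨hfree, hJd, hd0, hdk, hdb⟩ := hvs i j hinb hvold
      have hd' : get2d 0 (f.foldl (processCell grid rows cols k) ([], v, d)).2.2 i j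
          = get2d 0 d i j := P5 i j hinb (hnotNew i j hvold)
      refine ⟨hfree, ?_, by omega, by omega, ?_⟩
      · rw [sweep_vis grid rows cols k v d J f hInv i j hinb hvold, hd']
      · rw [hd']
        have : unvis (f.foldl (processCell grid rows cols k) ([], v, d)).2.1 ≤ unvis v := by
          omega
        have hcast : (unvis (f.foldl (processCell grid rows cols k) ([], v, d)).2.1 : Int)
            ≤ (unvis v : Int) := by exact_mod_cast this
        omega
    · have hkb := newly_bound grid rows cols k v d J f hInv i j hNnew
      have hd' : get2d 0 (f.foldl (processCell grid rows cols k) ([], v, d)).2.2 i j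
          = k + 1 := P4 i j hinb hNnew
      refine ⟨hNnew.2.1, ?_, by omega, by omega, ?_⟩
      · rw [sweep_new grid rows cols k v d J f hInv i j hinb hNnew, hd']
      · rw [hd']
        have hmem : (i, j) ∈ (f.foldl (processCell grid rows cols k) ([], v, d)).1 :=
          (P6 (i, j)).2 (Or.inr hNnew)
        have hlen : 1 ≤ (f.foldl (processCell grid rows cols k) ([], v, d)).1.length :=
          List.length_pos_iff.2 (List.ne_nil_of_mem hmem)
        have : unvis (f.foldl (processCell grid rows cols k) ([], v, d)).2.1 + 1 ≤ unvis v := by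
          omega
        have hcast : (unvis (f.foldl (processCell grid rows cols k) ([], v, d)).2.1 : Int) + 1
            ≤ (unvis v : Int) := by exact_mod_cast this
        omega
  · -- unvisited spec at level k + 1
    intro i j hinb hnvis'
    have hnvis : ¬ get2d true v i j = true := fun h =>
      hnvis' ((P3 i j hinb).2 (Or.inl h))
    have hnN : ¬ Newly grid rows cols v f i j := fun h =>
      hnvis' ((P3 i j hinb).2 (Or.inr h))
    refine ⟨sweep_idle grid rows cols k v d J f hInv i j hinb hnvis hnN, ?_⟩
    rw [P5 i j hinb hnN]
    exact (hus i j hinb hnvis).2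
  · -- new frontier = cells at distance k + 1
    intro c
    rw [P6 c]
    constructor
    · rintro (hq | hN)
      · exact absurd hq (List.not_mem_nil)
      · exact ⟨hN.1, (P3 c.1 c.2 hN.1).2 (Or.inr hN), P4 c.1 c.2 hN.1 hN⟩
    · rintro ⟨hinb, hvis', hD'⟩
      rcases (P3 c.1 c.2 hinb).1 hvis' with hvold | hNnew
      · exfalso
        have hdk := (hvs c.1 c.2 hinb hvold).2.2.2.1
        rw [P5 c.1 c.2 hinb (hnotNew c.1 c.2 hvold)] at hD'
        omega
      · exact Or.inr hNnew
  · -- discovery closure at level k + 1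
    intro i j hinb hfree hnvis' dir hdir hinb2 hvis2'
    have hnvis : ¬ get2d true v i j = true := fun h =>
      hnvis' ((P3 i j hinb).2 (Or.inl h))
    have hnN : ¬ Newly grid rows cols v f i j := fun h =>
      hnvis' ((P3 i j hinb).2 (Or.inr h))
    rcases (P3 _ _ hinb2).1 hvis2' with hvold | hNnew
    · exfalso
      have hdn := hd4 i j hinb hfree hnvis dir hdir hinb2 hvold
      have hpmem : (i + dir.1, j + dir.2) ∈ f := (hcf (i + dir.1, j + dir.2)).2
        ⟨hinb2, hvold, hdn⟩
      refine hnN ⟨hinb, hfree, ?_, ?_⟩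
      · rcases Bool.eq_false_or_eq_true (get2d true v i j) with h' | h'
        · exact absurd h' hnvis
        · exact h'
      · refine ⟨(i + dir.1, j + dir.2), hpmem, (-dir.1, -dir.2), neg_mem_dirs dir hdir, ?_, ?_⟩
        · omega
        · omega
    · exact P4 _ _ hinb2 hNnew
  · -- neighbouring visited distances differ by at most one, at level k + 1
    intro i j hinb hvis' dir hdir hinb2 hvis2'
    rcases (P3 i j hinb).1 hvis' with hvold | hNnew
    · have hdself : get2d 0 (f.foldl (processCell grid rows cols k) ([], v, d)).2.2 i j
          = get2d 0 d i j := P5 i j hinb (hnotNew i j hvold)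
      have hdk := (hvs i j hinb hvold).2.2.2.1
      rcases (P3 _ _ hinb2).1 hvis2' with hvold2 | hNnew2
      · have hdn : get2d 0 (f.foldl (processCell grid rows cols k) ([], v, d)).2.2
            (i + dir.1) (j + dir.2) = get2d 0 d (i + dir.1) (j + dir.2) :=
          P5 _ _ hinb2 (hnotNew _ _ hvold2)
        rw [hdself, hdn]
        exact he5 i j hinb hvold dir hdir hinb2 hvold2
      · rw [hdself, P4 _ _ hinb2 hNnew2]
        omega
    · have hdself : get2d 0 (f.foldl (processCell grid rows cols k) ([], v, d)).2.2 i j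
          = k + 1 := P4 i j hinb hNnew
      rcases (P3 _ _ hinb2).1 hvis2' with hvold2 | hNnew2
      · have hdn := hd4 i j hinb hNnew.2.1 (by
            intro h
            have := hNnew.2.2.1
            rw [h] at this
            exact Bool.noConfusion this) dir hdir hinb2 hvold2
        rw [hdself, P5 _ _ hinb2 (hnotNew _ _ hvold2), hdn]
        omega
      · rw [hdself, P4 _ _ hinb2 hNnew2]
        omega

-- main synchronisation: the rendered relaxation loop equals level-BFS
lemma jloop_eq_bfsB (grid : List (List String)) (rows cols : Int) (hr : 0 < rows)
    (hc : 0 < cols) : ∀ (fuel : Nat) (k : Int) (v : List (List Bool)) (d J : List (List Int))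
      (f : List (Int × Int)), InvJ grid rows cols k v d J f →
      (unvis v : Int) + 1 ≤ (fuel : Int) →
      (jloop grid rows cols fuel J).map
          (fun row => row.map (fun x => if x < rows * cols + 1 then x else 0))
        = bfsB grid rows cols v d f k := by
  intro fuel
  induction fuel with
  | zero =>
    intro k v d J f hInv hfuel
    exfalso
    have : (0:Int) ≤ (unvis v : Int) := Int.natCast_nonneg _
    simp only [Nat.cast_zero] at hfuel
    omega
  | succ fuel ih =>
    intro k v d J f hInv hfuel
    cases f with
    | nil =>
      have hnone : ∀ i j : Int, ¬ Newly grid rows cols v [] i j := by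
        intro i j hcon
        rcases hcon.2.2.2 with ⟨p, hp, -⟩
        exact absurd hp (List.not_mem_nil)
      have hfix := sweep_fix grid rows cols k v d J [] hr hc hInv hnone
      rw [show jloop grid rows cols (fuel + 1) J = J from by simp [jloop, hfix]]
      rw [bfsB_nil]
      exact render_eq grid rows cols k v d J [] hr hc hInv
    | cons c rest =>
      have hInv' := hInv
      unfold InvJ at hInv'
      obtain ⟨hShv, hShd, hShJ, hk0, hvs, hus, hcf, hd4, he5⟩ := hInv'
      obtain ⟨S1, S2, P3, P4, P5, P6⟩ :=
        stepFold_set grid rows cols k (c :: rest) [] v d hShv hShd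
      set st := (c :: rest).foldl (processCell grid rows cols k) ([], v, d) with hst
      by_cases hN : ∃ i j : Int, Newly grid rows cols v (c :: rest) i j
      · obtain ⟨i0, j0, hN0⟩ := hN
        have hneq : ¬ sweep grid rows cols J = J := by
          intro heq
          have h1 := sweep_new grid rows cols k v d J (c :: rest) hInv i0 j0 hN0.1 hN0
          have h2 : get2d 0 J i0 j0 = rows * cols + 1 :=
            (hus i0 j0 hN0.1 (by
              intro h
              have hf := hN0.2.2.1
              rw [h] at hf
              exact Bool.noConfusion hf)).1
          have hkb := newly_bound grid rows cols k v d J (c :: rest) hInv i0 j0 hN0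
          have h3 : (0:Int) ≤ (unvis v : Int) := Int.natCast_nonneg _
          rw [heq, h2] at h1
          omega
        rw [show jloop grid rows cols (fuel + 1) J
            = jloop grid rows cols fuel (sweep grid rows cols J) from by
          simp [jloop, hneq]]
        have hstep := inv_step grid rows cols k v d J (c :: rest) hr hc hInv
        rw [← hst] at hstep
        have hmem0 : (i0, j0) ∈ st.1 := (P6 (i0, j0)).2 (Or.inr hN0)
        have hmeas : unvis st.2.1 + st.1.length = unvis v := by
          have := cellFold_meas grid rows cols k (c :: rest) ([], v, d)
          rw [← hst] at this
          simpa using this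
        have hfuel' : (unvis st.2.1 : Int) + 1 ≤ (fuel : Int) := by
          have hlen : 1 ≤ st.1.length := List.length_pos_iff.2 (List.ne_nil_of_mem hmem0)
          have hle : unvis st.2.1 + 1 ≤ unvis v := by omega
          have hcast : (unvis st.2.1 : Int) + 1 ≤ (unvis v : Int) := by exact_mod_cast hle
          push_cast at hfuel
          omega
        rw [ih (k + 1) st.2.1 st.2.2 (sweep grid rows cols J) st.1 hstep hfuel']
        exact (bfsB_cons grid rows cols v d c rest k).symm
      · push Not at hN
        have hfix := sweep_fix grid rows cols k v d J (c :: rest) hr hc hInv hN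
        have hq : st.1 = [] := by
          rw [List.eq_nil_iff_forall_not_mem]
          intro x hx
          rcases (P6 x).1 hx with h | h
          · exact absurd h (List.not_mem_nil)
          · exact hN x.1 x.2 h
        have hd' : st.2.2 = d := by
          apply eq_of_shape_get2d 0 _ d rows.toNat cols.toNat S2 hShd
          intro i j hi hj
          exact P5 (i : Int) (j : Int) ⟨by omega, by omega, by omega, by omega⟩ (hN _ _)
        rw [show jloop grid rows cols (fuel + 1) J = J from by simp [jloop, hfix]]
        rw [bfsB_cons grid rows cols v d c rest k, ← hst, hq, hd', bfsB_nil]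
        exact render_eq grid rows cols k v d J (c :: rest) hr hc hInv

-- the invariant holds initially
lemma inv_init (grid : List (List String)) (rows cols sx sy : Int) (hr : 0 < rows)
    (hc : 0 < cols) (hb : 0 ≤ sx ∧ sx < rows ∧ 0 ≤ sy ∧ sy < cols)
    (hfree : get2d "x" grid sx sy ≠ "x") :
    InvJ grid rows cols 0
      (set2d (List.replicate rows.toNat (List.replicate cols.toNat false)) sx sy true)
      (List.replicate rows.toNat (List.replicate cols.toNat (0 : Int)))
      (set2d (List.replicate rows.toNat (List.replicate cols.toNat (rows * cols + 1))) sx sy 0)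
      [(sx, sy)] := by
  obtain ⟨hb1, hb2, hb3, hb4⟩ := hb
  have hshv := shape_replicate rows.toNat cols.toNat false
  have hshJ := shape_replicate rows.toNat cols.toNat (rows * cols + 1)
  have hmul : (rows.toNat : Int) * (cols.toNat : Int) = rows * cols := by
    rw [Int.toNat_of_nonneg hr.le, Int.toNat_of_nonneg hc.le]
  have hsvis : get2d true
      (set2d (List.replicate rows.toNat (List.replicate cols.toNat false)) sx sy true)
      sx sy = true := get2d_set2d_self' true true hshv sx sy (by omega) (by omega)
  have hJ0 : get2d 0
      (set2d (List.replicate rows.toNat (List.replicate cols.toNat (rows * cols + 1))) sx sy 0)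
      sx sy = 0 := get2d_set2d_self' 0 0 hshJ sx sy (by omega) (by omega)
  have hvother : ∀ i j : Int, Inb rows cols i j → ¬ (i = sx ∧ j = sy) →
      get2d true (set2d (List.replicate rows.toNat (List.replicate cols.toNat false)) sx sy true)
        i j = false := by
    intro i j hinb hne
    obtain ⟨h1, h2, h3, h4⟩ := hinb
    rw [get2d_set2d_ne true true _ sx sy i j (by omega)]
    exact get2d_rep false true rows.toNat cols.toNat i j (by omega) (by omega)
  have hJother : ∀ i j : Int, Inb rows cols i j → ¬ (i = sx ∧ j = sy) →
      get2d 0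
        (set2d (List.replicate rows.toNat (List.replicate cols.toNat (rows * cols + 1))) sx sy 0)
        i j = rows * cols + 1 := by
    intro i j hinb hne
    obtain ⟨h1, h2, h3, h4⟩ := hinb
    rw [get2d_set2d_ne 0 0 _ sx sy i j (by omega)]
    exact get2d_rep (rows * cols + 1) 0 rows.toNat cols.toNat i j (by omega) (by omega)
  have hdzero : ∀ i j : Int,
      get2d 0 (List.replicate rows.toNat (List.replicate cols.toNat (0 : Int))) i j = 0 :=
    get2d_rep_zero rows.toNat cols.toNat
  have hunv : (unvis (set2d (List.replicate rows.toNat (List.replicate cols.toNat false))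
      sx sy true) : Int) = rows * cols - 1 := by
    have h1 := unvis_flip (List.replicate rows.toNat (List.replicate cols.toNat false)) sx sy
      (get2d_rep false true rows.toNat cols.toNat sx sy (by omega) (by omega))
    have h2 : unvis (List.replicate rows.toNat (List.replicate cols.toNat false))
        = rows.toNat * cols.toNat := by
      simp [unvis, List.map_replicate]
    rw [h2] at h1
    have h3 := congrArg (Nat.cast (R := Int)) h1
    push_cast at h3
    omega
  have hvis_start : ∀ i j : Int, Inb rows cols i j →
      get2d true (set2d (List.replicate rows.toNat (List.replicate cols.toNat false)) sx sy true)
        i j = true → i = sx ∧ j = sy := by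
    intro i j hinb hvis
    by_cases hne : i = sx ∧ j = sy
    · exact hne
    · rw [hvother i j hinb hne] at hvis
      exact Bool.noConfusion hvis
  unfold InvJ
  refine ⟨shape_set2d sx sy true hshv, shape_replicate rows.toNat cols.toNat 0,
    shape_set2d sx sy 0 hshJ, le_refl 0, ?_, ?_, ?_, ?_, ?_⟩
  · intro i j hinb hvis
    obtain ⟨rfl, rfl⟩ := hvis_start i j hinb hvis
    refine ⟨hfree, ?_, ?_, ?_, ?_⟩
    · rw [hJ0, hdzero]
    · rw [hdzero]
    · rw [hdzero]
    · rw [hdzero, hunv]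
      omega
  · intro i j hinb hnvis
    have hne : ¬ (i = sx ∧ j = sy) := by
      rintro ⟨rfl, rfl⟩
      exact hnvis hsvis
    exact ⟨hJother i j hinb hne, hdzero i j⟩
  · intro c
    constructor
    · intro hmem
      have hceq : c = (sx, sy) := List.mem_singleton.1 hmem
      have hc1 : c.1 = sx := by rw [hceq]
      have hc2 : c.2 = sy := by rw [hceq]
      rw [hc1, hc2]
      exact ⟨⟨hb1, hb2, hb3, hb4⟩, hsvis, hdzero sx sy⟩
    · rintro ⟨hinb, hvis, -⟩
      have := hvis_start c.1 c.2 hinb hvis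
      rw [List.mem_singleton, ← this.1, ← this.2]
  · intro i j hinb hfree' hnvis dir hdir hinb2 hvis2
    exact hdzero (i + dir.1) (j + dir.2)
  · intro i j hinb hvis dir hdir hinb2 hvis2
    rw [hdzero, hdzero]
    omega

-- ===== VERDICT (by name: the statement is the Claim_ definition above) =====
theorem cnt_distance_spec : Claim_equal_cnt_distance := by
  intro grid rows cols _ hpre
  unfold Spec_cnt_distance
  cases hs : findStart grid rows cols with
  | none => simp [cnt_distance, cnt_distance_alt, hs]
  | some p =>
    obtain ⟨sx, sy⟩ := p
    have hrc : 0 < rows ∧ 0 < cols := by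
      rcases hpre with ⟨h1, h2, -⟩ | ⟨h1, h2⟩
      · exact ⟨h1, h2⟩
      · exfalso
        have hr0 : rows.toNat = 0 := by omega
        have hc0 : cols.toNat = 0 := by omega
        unfold findStart at hs
        rw [hr0, hc0] at hs
        simp at hs
    obtain ⟨hb, hfree⟩ := findStart_bounds grid rows cols sx sy hrc.1 hrc.2 hs
    simp only [cnt_distance, cnt_distance_alt, hs]
    -- A = level-BFS
    have hv1 : get2d true
        (set2d (List.replicate rows.toNat (List.replicate cols.toNat false)) sx sy true)
        sx sy = true :=
      get2d_set2d_self' true true (shape_replicate rows.toNat cols.toNat false) sx sy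
        (by omega) (by omega)
    have keyA := bfsA_eq grid rows cols
      (2 * (unvis (set2d (List.replicate rows.toNat (List.replicate cols.toNat false)) sx sy true)
        + 1 + 0))
      0 [(sx, sy)] []
      (set2d (List.replicate rows.toNat (List.replicate cols.toNat false)) sx sy true)
      (List.replicate rows.toNat (List.replicate cols.toNat (0 : Int)))
      (by simp)
      (shape_replicate rows.toNat cols.toNat 0)
      (by
        intro c hcmem
        rw [List.mem_singleton] at hcmem
        subst hcmem
        exact ⟨hv1, get2d_rep_zero rows.toNat cols.toNat sx sy⟩)
      (by simp)
    rw [List.append_nil] at keyA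
    rw [keyA, ← bfsB_cons]
    -- level-BFS = rendered relaxation loop
    have hflip := unvis_flip (List.replicate rows.toNat (List.replicate cols.toNat false)) sx sy
      (by rw [get2d_rep false true rows.toNat cols.toNat sx sy (by omega) (by omega)])
    have hrep : unvis (List.replicate rows.toNat (List.replicate cols.toNat false))
        = rows.toNat * cols.toNat := by
      simp [unvis, List.map_replicate]
    have keyB := jloop_eq_bfsB grid rows cols hrc.1 hrc.2 (rows * cols + 1).toNat 0
      (set2d (List.replicate rows.toNat (List.replicate cols.toNat false)) sx sy true)
      (List.replicate rows.toNat (List.replicate cols.toNat (0 : Int)))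
      (set2d (List.replicate rows.toNat (List.replicate cols.toNat (rows * cols + 1))) sx sy 0)
      [(sx, sy)]
      (inv_init grid rows cols sx sy hrc.1 hrc.2 hb hfree)
      (by
        have hmul : (rows.toNat : Int) * (cols.toNat : Int) = rows * cols := by
          rw [Int.toNat_of_nonneg hrc.1.le, Int.toNat_of_nonneg hrc.2.le]
        have hpos : (0:Int) ≤ rows * cols := by
          rw [← hmul]; positivity
        have h2 : ((rows * cols + 1).toNat : Int) = rows * cols + 1 := by omega
        rw [h2]
        have h1 : unvis (set2d (List.replicate rows.toNat (List.replicate cols.toNat false))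
            sx sy true) + 1 = rows.toNat * cols.toNat := by rw [hflip, hrep]
        have h1' := congrArg (Nat.cast (R := Int)) h1
        push_cast at h1'
        rw [hmul] at h1'
        omega)
    rw [← keyB]
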